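-- pv_equiv track=rewrite | github.com/thorwhalen/atonal | atonal/base.py | contains_abstract_subset
-- ===== SOURCE A (Python) =====
-- from typing import (
--     Iterable,
--     Iterator,
--     List,
--     Tuple,
--     Callable,
--     Dict,
--     Any,
--     Sequence,
--     Set,
--     FrozenSet,
--     Optional,
--     Hashable,
-- )
--
-- def transpose(pc_set: Iterable[int], interval: int) -> FrozenSet[int]:
--     """Transpose a pc-set by `interval` modulo 12.
--
--     >>> transpose((0, 4, 7), 1) == frozenset({1, 5, 8})
--     True
--     """
--     return frozenset(((p + interval) % 12) for p in set(pc_set))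
--
-- def invert(pc_set: Iterable[int]) -> FrozenSet[int]:
--     """Invert a pc-set about 0 (map p -> -p mod 12).
--
--     >>> invert((0, 4, 7)) == frozenset({0, 5, 8})
--     True
--     """
--     return frozenset(((-p) % 12) for p in set(pc_set))
--
-- def contains_abstract_subset(superset: Iterable[int], subset: Iterable[int]) -> bool:
--     """Check if subset is contained in superset under some T_n or IT_n.
--
--     This checks whether the subset can be found within the superset under any
--     transposition or inversion-transposition operation. More sophisticated than
--     simple subset checking.
--
--     >>> contains_abstract_subset((0, 4, 7), (0, 3))  # minor 3rd in major triad
--     True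
--     >>> contains_abstract_subset((0, 4, 7), (0, 2))  # major 2nd NOT in major triad
--     False
--     >>> contains_abstract_subset((0, 2, 4, 5, 7, 9, 11), (0, 4, 7))  # major triad in major scale
--     True
--     """
--     sup = frozenset(superset)
--     sub = frozenset(subset)
--
--     # Try all 24 transformations (12 T_n + 12 IT_n)
--     for n in range(12):
--         if transpose(sub, n).issubset(sup):
--             return True
--         if transpose(invert(sub), n).issubset(sup):
--             return True
--
--     return False
-- ===== SOURCE B (Python) =====
-- def contains_abstract_subset(superset, subset):
--     """Check if subset is contained in superset under some T_n or IT_n.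
--
--     Computes the set of valid transposition offsets for each of the two forms
--     (the subset's pitch classes and their inversion) by intersecting, pitch by
--     pitch, the offsets that land that pitch in the superset; returns True iff
--     either offset set is nonempty.
--     """
--     sup = frozenset(superset)
--
--     def offsets(form):
--         allowed = set(range(12))
--         for p in form:
--             allowed &= {n for n in range(12) if (p + n) % 12 in sup}
--         return allowed
--
--     base = {p % 12 for p in subset}
--     inverted = {(-p) % 12 for p in base}
--     return bool(offsets(base)) or bool(offsets(inverted))
-- ===== Notes on version B (the rewrite author's own statement) =====
-- stated objective: faster
-- what changed: Replaces A's 24-iteration loop that builds each transposed/inverted frozenset and tests subset inclusion with computing, for each of the two forms, the set of valid transposition offsets as an intersection of per-pitch offset sets and checking nonemptiness.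
import Mathlib
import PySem

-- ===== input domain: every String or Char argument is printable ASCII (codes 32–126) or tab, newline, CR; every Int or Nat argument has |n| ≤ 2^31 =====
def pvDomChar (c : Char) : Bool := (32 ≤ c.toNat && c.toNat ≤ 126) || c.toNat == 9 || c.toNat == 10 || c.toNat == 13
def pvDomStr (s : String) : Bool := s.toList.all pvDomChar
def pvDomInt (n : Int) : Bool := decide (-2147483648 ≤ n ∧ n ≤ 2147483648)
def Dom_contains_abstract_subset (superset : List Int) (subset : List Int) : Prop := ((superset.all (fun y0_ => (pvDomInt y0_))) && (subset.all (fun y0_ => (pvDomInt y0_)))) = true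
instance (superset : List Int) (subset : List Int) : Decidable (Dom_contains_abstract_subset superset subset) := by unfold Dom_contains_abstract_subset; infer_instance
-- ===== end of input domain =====

-- B replaces A's 24-iteration build-and-test-subset loop by intersecting per-pitch
-- transposition-offset sets for the two forms (objective: alternative decomposition).

-- ===== PORT A =====
-- transpose(pc_set, interval)
def pyTranspose (pcSet : List Int) (interval : Int) : PySem.Set Int :=
  PySem.Set.ofList ((PySem.Set.ofList pcSet).map (fun p => PySem.Int.mod (p + interval) 12))

-- invert(pc_set)
def pyInvert (pcSet : List Int) : PySem.Set Int :=
  PySem.Set.ofList ((PySem.Set.ofList pcSet).map (fun p => PySem.Int.mod (-p) 12))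

def contains_abstract_subset (superset : List Int) (subset : List Int) : Bool :=
  let sup := PySem.Set.ofList superset
  let sub := PySem.Set.ofList subset
  (PySem.List.pyRange 0 12 1).any (fun n =>
    PySem.Set.issubset (pyTranspose sub n) sup ||
    PySem.Set.issubset (pyTranspose (pyInvert sub) n) sup)

-- ===== PORT B =====
-- offsets(form): intersection over p in form of {n in range(12) | (p + n) % 12 in sup},
-- seeded with set(range(12))
def bOffsets (sup : PySem.Set Int) (form : PySem.Set Int) : PySem.Set Int :=
  form.foldl
    (fun allowed p =>
      PySem.Set.inter allowed
        ((PySem.List.pyRange 0 12 1).filter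
          (fun n => PySem.Set.contains sup (PySem.Int.mod (p + n) 12))))
    (PySem.Set.ofList (PySem.List.pyRange 0 12 1))

def contains_abstract_subset_alt (superset : List Int) (subset : List Int) : Bool :=
  let sup : PySem.Set Int := PySem.Set.ofList superset
  let base : PySem.Set Int :=
    PySem.Set.ofList ((PySem.Set.ofList subset).map (fun p => PySem.Int.mod p 12))
  let inverted : PySem.Set Int :=
    PySem.Set.ofList (base.map (fun p => PySem.Int.mod (-p) 12))
  !(bOffsets sup base).isEmpty || !(bOffsets sup inverted).isEmpty

-- ===== PRECONDITION & SPEC =====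
def Spec_contains_abstract_subset (superset : List Int) (subset : List Int) (out : Bool) : Prop := out = contains_abstract_subset_alt superset subset
instance (superset : List Int) (subset : List Int) (out : Bool) : Decidable (Spec_contains_abstract_subset superset subset out) := by unfold Spec_contains_abstract_subset; infer_instance

-- ===== CLAIM (what is proved, stated in full; the proofs are below) =====
def Claim_equal_contains_abstract_subset : Prop := ∀ (superset : List Int) (subset : List Int), Dom_contains_abstract_subset superset subset → Spec_contains_abstract_subset superset subset (contains_abstract_subset superset subset)

-- ===== LEMMAS AND PROOFS =====

-- common normal form: some offset n places the f-image of subset inside superset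
def Cond (sup sub : List Int) (f : Int → Int) : Prop :=
  ∃ n : Int, 0 ≤ n ∧ n < 12 ∧ ∀ p ∈ sub, (f p + n) % 12 ∈ sup

theorem pv_mod12 (a : Int) : PySem.Int.mod a 12 = a % 12 :=
  PySem.Int.mod_eq_emod_of_pos (by norm_num)

theorem cond_congr (sup sub : List Int) (f g : Int → Int)
    (h : ∀ p, f p % 12 = g p % 12) : Cond sup sub f ↔ Cond sup sub g := by
  unfold Cond
  refine exists_congr fun n => and_congr_right fun h0 => and_congr_right fun h1 => ?_
  refine forall₂_congr fun p _ => ?_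
  have := h p
  have : (f p + n) % 12 = (g p + n) % 12 := by omega
  rw [this]

theorem pv_not_isEmpty_iff {α : Type} (l : List α) : (!l.isEmpty) = true ↔ ∃ x, x ∈ l := by
  cases l <;> simp

theorem mem_foldl_inter (g : Int → List Int) (F init : List Int) (x : Int) :
    x ∈ F.foldl (fun acc p => PySem.Set.inter acc (g p)) init ↔
      x ∈ init ∧ ∀ p ∈ F, x ∈ g p := by
  induction F generalizing init with
  | nil => simp
  | cons p F ih =>
    rw [List.foldl_cons, ih]
    simp [PySem.Set.mem_inter]
    tauto

theorem A_iff (sup sub : List Int) :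
    contains_abstract_subset sup sub = true ↔
      Cond sup sub id ∨ Cond sup sub (fun p => (-p) % 12) := by
  unfold contains_abstract_subset pyTranspose pyInvert Cond
  simp only [List.any_eq_true, Bool.or_eq_true, PySem.Set.issubset_iff,
    PySem.Set.mem_ofList, List.mem_map, PySem.List.mem_pyRange_one, pv_mod12]
  constructor
  · rintro ⟨n, ⟨h0, h1⟩, hc⟩
    rcases hc with h | h
    · exact Or.inl ⟨n, h0, h1, fun p hp => h _ ⟨p, hp, rfl⟩⟩
    · refine Or.inr ⟨n, h0, h1, fun p hp => h _ ⟨(-p) % 12, ⟨p, hp, rfl⟩, rfl⟩⟩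
  · rintro (⟨n, h0, h1, h⟩ | ⟨n, h0, h1, h⟩)
    · exact ⟨n, ⟨h0, h1⟩, Or.inl (by rintro x ⟨p, hp, rfl⟩; exact h p hp)⟩
    · refine ⟨n, ⟨h0, h1⟩, Or.inr ?_⟩
      rintro x ⟨q, ⟨p, hp, rfl⟩, rfl⟩
      exact h p hp

theorem B_iff (sup sub : List Int) :
    contains_abstract_subset_alt sup sub = true ↔
      Cond sup sub (fun p => p % 12) ∨ Cond sup sub (fun p => (-(p % 12)) % 12) := by
  unfold contains_abstract_subset_alt bOffsets Cond
  simp only [Bool.or_eq_true, pv_not_isEmpty_iff, mem_foldl_inter,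
    PySem.Set.mem_ofList, List.mem_map, List.mem_filter, PySem.List.mem_pyRange_one,
    pv_mod12, PySem.Set.contains_eq_listContains, List.contains_eq_mem, decide_eq_true_eq]
  constructor
  · rintro (⟨n, ⟨h0, h1⟩, h⟩ | ⟨n, ⟨h0, h1⟩, h⟩)
    · refine Or.inl ⟨n, h0, h1, fun p hp => ?_⟩
      exact (h _ ⟨p, hp, rfl⟩).2
    · refine Or.inr ⟨n, h0, h1, fun p hp => ?_⟩
      exact (h _ ⟨p % 12, ⟨p, hp, rfl⟩, rfl⟩).2
  · rintro (⟨n, h0, h1, h⟩ | ⟨n, h0, h1, h⟩)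
    · refine Or.inl ⟨n, ⟨h0, h1⟩, ?_⟩
      rintro q ⟨p, hp, rfl⟩
      exact ⟨⟨h0, h1⟩, h p hp⟩
    · refine Or.inr ⟨n, ⟨h0, h1⟩, ?_⟩
      rintro q ⟨r, ⟨p, hp, rfl⟩, rfl⟩
      exact ⟨⟨h0, h1⟩, h p hp⟩

-- ===== VERDICT (by name: the statement is the Claim_ definition above) =====
theorem contains_abstract_subset_spec : Claim_equal_contains_abstract_subset := by
  intro sup sub _
  unfold Spec_contains_abstract_subset
  rw [Bool.eq_iff_iff, A_iff, B_iff]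
  refine or_congr ?_ ?_
  · exact cond_congr sup sub id (fun p => p % 12) (fun p => by simp [Int.emod_emod_of_dvd])
  · exact cond_congr sup sub _ _ (fun p => by
      have := Int.emod_emod_of_dvd (-p) (dvd_refl (12:Int))
      omega)
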